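-- pv_equiv track=rewrite | github.com/goutkannan/HackerRank | Data Structure and Algorithms/Trees/BST/oneNode.py | if_bst_has_one_node
-- ===== SOURCE A (Python) =====
-- def if_bst_has_one_node(data):
--     """Given Preorder traversal of a BST, check if each non-leaf node has only one child.
--     Assume that the BST contains unique entries."""
--     n = len(data)
--     if n>2:
--         _min,_max =  [data[n-1], data[n-2]] if data[n-1] < data[n-2] else [data[n-2],data[n-1]]
--         for i in range(n-2,0,-1):
--             i-=1
--             if data[i] < _min:
--                 _min = data[i]
--             elif  data[i] > _max:
--                 _max = data[i]
--             else:
--                 return False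
--     return True
-- ===== SOURCE B (Python) =====
-- def if_bst_has_one_node(data):
--     """Suffix-extremes rewrite: one backward pass builds suffix min/max tables,
--     then a forward pass checks each element against the extremes of its suffix."""
--     n = len(data)
--     if n <= 2:
--         return True
--     smin = [data[-1]]
--     smax = [data[-1]]
--     for x in reversed(data[:-1]):
--         smin.append(min(x, smin[-1]))
--         smax.append(max(x, smax[-1]))
--     smin.reverse()
--     smax.reverse()
--     return all(x < lo or x > hi
--                for x, lo, hi in zip(data[:n - 2], smin[1:], smax[1:]))
-- ===== Notes on version B (the rewrite author's own statement) =====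
-- stated objective: alternative
-- what changed: Replaces A's single right-to-left scan with early-exit running extremes by two separate passes: a backward pass that materialises suffix-min/suffix-max tables, then a forward pass checking each element against the precomputed extremes of its suffix.
import Mathlib
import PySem

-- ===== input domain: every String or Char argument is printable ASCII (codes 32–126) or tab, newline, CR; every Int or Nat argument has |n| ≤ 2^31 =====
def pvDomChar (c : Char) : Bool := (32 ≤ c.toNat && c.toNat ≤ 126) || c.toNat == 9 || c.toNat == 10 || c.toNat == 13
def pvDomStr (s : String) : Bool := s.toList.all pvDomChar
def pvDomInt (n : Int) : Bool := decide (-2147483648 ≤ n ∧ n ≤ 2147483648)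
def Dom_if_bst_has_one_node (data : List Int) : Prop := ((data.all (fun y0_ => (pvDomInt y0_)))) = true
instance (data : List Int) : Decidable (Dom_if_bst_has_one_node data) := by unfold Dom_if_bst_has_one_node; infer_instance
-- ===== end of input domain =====

-- B replaces A's single right-to-left scan carrying running extremes by two passes:
-- a backward pass building suffix-min/max tables, then a forward check (alternative decomposition, same cost).

-- ===== PORT A =====
-- the 'for i in range(n-2,0,-1): i-=1 …' loop (early return = false)
def aLoop (data : List Int) (is : List Int) (mn mx : Int) : Bool :=
  match is with
  | [] => true
  | i :: rest =>
    let x := PySem.List.pyGetD data (i - 1) 0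
    if x < mn then aLoop data rest x mx
    else if x > mx then aLoop data rest mn x
    else false

def if_bst_has_one_node (data : List Int) : Bool :=
  let n : Int := data.length
  if n > 2 then
    let d1 := PySem.List.pyGetD data (n - 1) 0
    let d2 := PySem.List.pyGetD data (n - 2) 0
    let p := if d1 < d2 then (d1, d2) else (d2, d1)
    aLoop data (PySem.List.pyRange (n - 2) 0 (-1)) p.1 p.2
  else true

-- ===== PORT B =====
-- one step of the backward table-building loop: append min/max of x and the tables' last entries
def bStep (acc : List Int × List Int) (x : Int) : List Int × List Int :=
  (acc.1 ++ [min x (PySem.List.pyGetD acc.1 (-1) 0)],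
   acc.2 ++ [max x (PySem.List.pyGetD acc.2 (-1) 0)])

def if_bst_has_one_node_alt (data : List Int) : Bool :=
  let n : Int := data.length
  if n ≤ 2 then true
  else
    let dl := PySem.List.pyGetD data (-1) 0
    let tabs := ((PySem.List.slice data none (some (-1))).reverse).foldl bStep ([dl], [dl])
    let smin := tabs.1.reverse
    let smax := tabs.2.reverse
    let trip := (PySem.List.slice data none (some (n - 2))).zip
                ((PySem.List.slice smin (some 1) none).zip (PySem.List.slice smax (some 1) none))
    trip.all (fun t => decide (t.1 < t.2.1) || decide (t.1 > t.2.2))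

-- ===== PRECONDITION & SPEC =====
def Spec_if_bst_has_one_node (data : List Int) (out : Bool) : Prop := out = if_bst_has_one_node_alt data
instance (data : List Int) (out : Bool) : Decidable (Spec_if_bst_has_one_node data out) := by unfold Spec_if_bst_has_one_node; infer_instance

-- ===== CLAIM (what is proved, stated in full; the proofs are below) =====
def Claim_equal_if_bst_has_one_node : Prop := ∀ (data : List Int), Dom_if_bst_has_one_node data → Spec_if_bst_has_one_node data (if_bst_has_one_node data)

-- ===== LEMMAS AND PROOFS =====

-- minimum / maximum of a nonempty list (value 0 on [] is never used)
def sufMin : List Int → Int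
  | [] => 0
  | [x] => x
  | x :: y :: t => min x (sufMin (y :: t))

def sufMax : List Int → Int
  | [] => 0
  | [x] => x
  | x :: y :: t => max x (sufMax (y :: t))

-- suffix-minima table: (smins l)[i] = min of (l.drop i)
def smins : List Int → List Int
  | [] => []
  | x :: xs => sufMin (x :: xs) :: smins xs

def smaxs : List Int → List Int
  | [] => []
  | x :: xs => sufMax (x :: xs) :: smaxs xs

-- A's loop re-expressed structurally over the reversed prefix it scans
def rloop : List Int → Int → Int → Bool
  | [], _, _ => true
  | x :: xs, mn, mx =>
    if x < mn then rloop xs x mx else if x > mx then rloop xs mn x else false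

-- "each element of l lies outside the extremes of its suffix-within-l joined with (mn, mx)"
def Hf : List Int → Int → Int → Bool
  | [], _, _ => true
  | x :: xs, mn, mx =>
    (decide (x < xs.foldr min mn) || decide (x > xs.foldr max mx)) && Hf xs mn mx

-- the common characterisation: every element except the last two is outside its suffix extremes
def G : List Int → Bool
  | [] => true
  | [_] => true
  | [_, _] => true
  | x :: y :: z :: t =>
    (decide (x < sufMin (y :: z :: t)) || decide (x > sufMax (y :: z :: t))) && G (y :: z :: t)

theorem sufMin_cons (x : Int) (xs : List Int) (h : xs ≠ []) :
    sufMin (x :: xs) = min x (sufMin xs) := by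
  cases xs with
  | nil => exact absurd rfl h
  | cons y t => rfl

theorem sufMax_cons (x : Int) (xs : List Int) (h : xs ≠ []) :
    sufMax (x :: xs) = max x (sufMax xs) := by
  cases xs with
  | nil => exact absurd rfl h
  | cons y t => rfl

theorem G_short (l : List Int) (h : l.length ≤ 2) : G l = true := by
  match l, h with
  | [], _ => rfl
  | [_], _ => rfl
  | [_, _], _ => rfl
  | _ :: _ :: _ :: _, h => simp at h

theorem G_cons (x : Int) (xs : List Int) (h : 2 ≤ xs.length) :
    G (x :: xs) = ((decide (x < sufMin xs) || decide (x > sufMax xs)) && G xs) := by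
  match xs, h with
  | y :: z :: t, _ => rfl

-- ===== A-side =====

theorem aLoop_eq_rloop (data : List Int) (k : Nat) (hk : k ≤ data.length) (mn mx : Int) :
    aLoop data (PySem.List.pyRange (k : Int) 0 (-1)) mn mx
      = rloop ((data.take k).reverse) mn mx := by
  induction k generalizing mn mx with
  | zero => simp [PySem.List.pyRange_neg_one_eq_nil, aLoop, rloop]
  | succ k ih =>
    rw [PySem.List.pyRange_neg_one_cons (by exact_mod_cast Nat.succ_pos k)]
    have hk' : k < data.length := hk
    have he : ((((k : Nat) + 1 : Nat) : Int) - 1) = ((k : Nat) : Int) := by push_cast; ring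
    have hx : PySem.List.pyGetD data (((k : Nat) : Int)) 0 = data[k] := by
      rw [PySem.List.pyGetD_natCast, List.getD_eq_getElem _ _ hk']
    have htake : (data.take (k + 1)).reverse = data[k] :: (data.take k).reverse := by
      rw [List.take_add_one, List.getElem?_eq_getElem hk']
      simp
    rw [htake]
    show aLoop data _ mn mx = _
    unfold aLoop
    rw [he, hx]
    show (if data[k] < mn then aLoop data (PySem.List.pyRange ((k : Nat) : Int) 0 (-1)) data[k] mx
          else if data[k] > mx then aLoop data (PySem.List.pyRange ((k : Nat) : Int) 0 (-1)) mn data[k]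
          else false)
        = rloop (data[k] :: (data.take k).reverse) mn mx
    show _ = (if data[k] < mn then rloop ((data.take k).reverse) data[k] mx
          else if data[k] > mx then rloop ((data.take k).reverse) mn data[k] else false)
    split_ifs with h1 h2
    · exact ih (Nat.le_of_lt hk') _ _
    · exact ih (Nat.le_of_lt hk') _ _
    · rfl

theorem Hf_snoc (p : List Int) (y mn mx : Int) :
    Hf (p ++ [y]) mn mx
      = (Hf p (min y mn) (max y mx) && (decide (y < mn) || decide (y > mx))) := by
  induction p with
  | nil => simp [Hf]; rfl
  | cons x p ih =>
    show ((decide _ || decide _) && Hf (p ++ [y]) mn mx) = _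
    rw [ih]
    simp [Hf, List.foldr_append, Bool.and_assoc]

theorem rloop_eq_Hf (r : List Int) (mn mx : Int) (h : mn ≤ mx) :
    rloop r mn mx = Hf r.reverse mn mx := by
  induction r generalizing mn mx with
  | nil => rfl
  | cons y rs ih =>
    rw [List.reverse_cons, Hf_snoc]
    show (if y < mn then rloop rs y mx else if y > mx then rloop rs mn y else false) = _
    by_cases h1 : y < mn
    · rw [if_pos h1, min_eq_left (le_of_lt h1), max_eq_right (le_trans (le_of_lt h1) h)]
      simp [decide_eq_true h1, ih _ _ (le_trans (le_of_lt h1) h)]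
    · rw [if_neg h1]
      by_cases h2 : y > mx
      · rw [if_pos h2, min_eq_right (le_of_not_gt h1), max_eq_left (le_of_lt h2)]
        have : mn ≤ y := le_trans h (le_of_lt h2)
        simp [h1, decide_eq_true h2, ih _ _ this]
      · simp [h1, h2]

theorem sufMin_append_pair (p : List Int) (a b : Int) :
    sufMin (p ++ [a, b]) = p.foldr min (min a b) := by
  induction p with
  | nil => rfl
  | cons x p ih =>
    rw [List.cons_append, sufMin_cons _ _ (by simp), ih]
    rfl

theorem sufMax_append_pair (p : List Int) (a b : Int) :
    sufMax (p ++ [a, b]) = p.foldr max (max a b) := by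
  induction p with
  | nil => rfl
  | cons x p ih =>
    rw [List.cons_append, sufMax_cons _ _ (by simp), ih]
    rfl

theorem G_append_pair (p : List Int) (a b : Int) :
    G (p ++ [a, b]) = Hf p (min a b) (max a b) := by
  induction p with
  | nil => rfl
  | cons x p ih =>
    rw [List.cons_append, G_cons _ _ (by simp), ih, sufMin_append_pair, sufMax_append_pair]
    rfl

theorem a_eq_G (data : List Int) : if_bst_has_one_node data = G data := by
  unfold if_bst_has_one_node
  by_cases h : (data.length : Int) > 2
  · rw [if_pos h]
    have hlen : 3 ≤ data.length := by exact_mod_cast h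
    have h1 : ((data.length : Int) - 1) = ((data.length - 1 : Nat) : Int) := by omega
    have h2 : ((data.length : Int) - 2) = ((data.length - 2 : Nat) : Int) := by omega
    have hi1 : data.length - 1 < data.length := by omega
    have hi2 : data.length - 2 < data.length := by omega
    have hd1 : PySem.List.pyGetD data ((data.length : Int) - 1) 0 = data[data.length - 1] := by
      rw [h1, PySem.List.pyGetD_natCast, List.getD_eq_getElem _ _ hi1]
    have hd2 : PySem.List.pyGetD data ((data.length : Int) - 2) 0 = data[data.length - 2] := by
      rw [h2, PySem.List.pyGetD_natCast, List.getD_eq_getElem _ _ hi2]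
    have hsplit : data.take (data.length - 2) ++ [data[data.length - 2], data[data.length - 1]] = data := by
      conv_rhs => rw [← List.take_append_drop (data.length - 2) data]
      congr 1
      rw [List.drop_eq_getElem_cons hi2]
      have e1 : data.length - 2 + 1 = data.length - 1 := by omega
      rw [e1, List.drop_eq_getElem_cons hi1]
      have e2 : data.length - 1 + 1 = data.length := by omega
      rw [e2, List.drop_length]
    rw [hd1, hd2, h2, aLoop_eq_rloop data (data.length - 2) (by omega)]
    set a := data[data.length - 2] with ha
    set b := data[data.length - 1] with hb
    have hG : G data = Hf (data.take (data.length - 2)) (min a b) (max a b) := by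
      conv_lhs => rw [← hsplit]
      rw [G_append_pair]
    rw [hG]
    by_cases hc : b < a
    · have he : (if b < a then (b, a) else (a, b)) = (b, a) := if_pos hc
      rw [he]
      show rloop _ b a = _
      rw [rloop_eq_Hf _ _ _ (le_of_lt hc), List.reverse_reverse,
        min_eq_right (le_of_lt hc), max_eq_left (le_of_lt hc)]
    · have he : (if b < a then (b, a) else (a, b)) = (a, b) := if_neg hc
      rw [he]
      show rloop _ a b = _
      rw [rloop_eq_Hf _ _ _ (le_of_not_gt hc), List.reverse_reverse,
        min_eq_left (le_of_not_gt hc), max_eq_right (le_of_not_gt hc)]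
  · rw [if_neg h, G_short data (by omega)]

-- ===== B-side =====

theorem bStep_fold (r : List Int) : ∀ (s : List Int), s ≠ [] →
    r.foldl bStep ((smins s).reverse, (smaxs s).reverse)
      = ((smins (r.reverse ++ s)).reverse, (smaxs (r.reverse ++ s)).reverse) := by
  induction r with
  | nil => intro s _; simp
  | cons x r ih =>
    intro s hs
    rw [List.foldl_cons]
    have hlast1 : PySem.List.pyGetD (smins s).reverse (-1) 0 = sufMin s := by
      cases s with
      | nil => exact absurd rfl hs
      | cons a t =>
        show PySem.List.pyGetD ((sufMin (a :: t) :: smins t).reverse) (-1) 0 = _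
        rw [List.reverse_cons, PySem.List.pyGetD_neg_one_append_singleton]
    have hlast2 : PySem.List.pyGetD (smaxs s).reverse (-1) 0 = sufMax s := by
      cases s with
      | nil => exact absurd rfl hs
      | cons a t =>
        show PySem.List.pyGetD ((sufMax (a :: t) :: smaxs t).reverse) (-1) 0 = _
        rw [List.reverse_cons, PySem.List.pyGetD_neg_one_append_singleton]
    have hstep : bStep ((smins s).reverse, (smaxs s).reverse) x
        = ((smins (x :: s)).reverse, (smaxs (x :: s)).reverse) := by
      unfold bStep
      rw [hlast1, hlast2]
      show ((smins s).reverse ++ [min x (sufMin s)], (smaxs s).reverse ++ [max x (sufMax s)]) = _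
      rw [← sufMin_cons _ _ hs, ← sufMax_cons _ _ hs]
      show _ = ((sufMin (x :: s) :: smins s).reverse, (sufMax (x :: s) :: smaxs s).reverse)
      simp
    rw [hstep, ih (x :: s) (by simp)]
    simp

theorem chk_eq_G (l : List Int) :
    ((l.take (l.length - 2)).zip (((smins l).tail).zip ((smaxs l).tail))).all
        (fun t => decide (t.1 < t.2.1) || decide (t.1 > t.2.2)) = G l := by
  induction l with
  | nil => rfl
  | cons x xs ih =>
    by_cases h : 2 ≤ xs.length
    · match xs, h, ih with
      | y :: z :: t, _, ih =>
        have e1 : (x :: y :: z :: t).length - 2 = ((y :: z :: t).length - 2) + 1 := by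
          simp
        rw [e1, List.take_succ_cons]
        simp only [smins, smaxs, List.tail_cons, List.zip_cons_cons, List.all_cons,
          List.length_cons] at ih ⊢
        rw [G_cons _ _ (by simp), ← ih]
    · have hx : xs.length ≤ 1 := by omega
      match xs, hx with
      | [], _ => rfl
      | [y], _ => rfl

theorem alt_eq_G (data : List Int) : if_bst_has_one_node_alt data = G data := by
  unfold if_bst_has_one_node_alt
  by_cases h : (data.length : Int) ≤ 2
  · rw [if_pos h, G_short data (by omega)]
  · rw [if_neg h]
    have hlen : 3 ≤ data.length := by omega
    have hd : data ≠ [] := List.ne_nil_of_length_pos (by omega)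
    rw [PySem.List.pyGetD_neg_one _ _ hd, PySem.List.slice_to_neg_one]
    have hfold' : List.foldl bStep ([data.getLast hd], [data.getLast hd]) data.dropLast.reverse
        = ((smins data).reverse, (smaxs data).reverse) := by
      have hbf := bStep_fold data.dropLast.reverse [data.getLast hd] (by simp)
      have hcat : data.dropLast.reverse.reverse ++ [data.getLast hd] = data := by
        rw [List.reverse_reverse]
        exact List.dropLast_concat_getLast hd
      rw [hcat] at hbf
      exact hbf
    show (((PySem.List.slice data none (some ((data.length : Int) - 2))).zip
        ((PySem.List.slice (List.foldl bStep ([data.getLast hd], [data.getLast hd]) data.dropLast.reverse).1.reverse (some 1) none).zip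
         (PySem.List.slice (List.foldl bStep ([data.getLast hd], [data.getLast hd]) data.dropLast.reverse).2.reverse (some 1) none))).all
        (fun t => decide (t.1 < t.2.1) || decide (t.1 > t.2.2))) = G data
    rw [hfold']
    simp only [List.reverse_reverse]
    have h2 : ((data.length : Int) - 2) = ((data.length - 2 : Nat) : Int) := by omega
    rw [h2, PySem.List.slice_to_natCast, PySem.List.slice_from_one, PySem.List.slice_from_one]
    exact chk_eq_G data

-- ===== VERDICT (by name: the statement is the Claim_ definition above) =====
theorem if_bst_has_one_node_spec : Claim_equal_if_bst_has_one_node := by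
  intro data _
  unfold Spec_if_bst_has_one_node
  rw [a_eq_G, alt_eq_G]
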